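-- pv_equiv track=rewrite | github.com/ralphbs/Interviews | Arrays/game_of_life.py | get_alive_neighbors
-- ===== SOURCE A (Python) =====
-- def get_alive_neighbors(grid, i, j, num_rows, num_cols):
--     res = 0
--     for x in [-1,0,1]:
--         for y in [-1,0,1]:
--                 if x == 0 and y == 0:
--                     continue
--                 res = res + get_grid_value(grid, i+x, j+y, num_rows, num_cols)
--     return res
--
-- def get_grid_value(grid, i, j, num_rows, num_cols):
--     if i < 0 or i >= num_rows or j < 0 or j >= num_cols:
--         return 0
--     return grid[i][j]
-- ===== SOURCE B (Python) =====
-- def get_alive_neighbors(grid, i, j, num_rows, num_cols):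
--     def block_sum(r0, r1, c0, c1):
--         total = 0
--         for row in grid[max(r0, 0):max(min(r1, num_rows), 0)]:
--             total += sum(row[max(c0, 0):max(min(c1, num_cols), 0)])
--         return total
--     return block_sum(i - 1, i + 2, j - 1, j + 2) - block_sum(i, i + 1, j, j + 1)
-- ===== Notes on version B (the rewrite author's own statement) =====
-- stated objective: alternative
-- what changed: B computes the sum of the whole clamped 3x3 sub-block via list slicing (inclusion-exclusion) and subtracts the 1x1 center block, instead of looping over the 8 offsets with a per-cell bounds-checking helper.
import Mathlib
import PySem

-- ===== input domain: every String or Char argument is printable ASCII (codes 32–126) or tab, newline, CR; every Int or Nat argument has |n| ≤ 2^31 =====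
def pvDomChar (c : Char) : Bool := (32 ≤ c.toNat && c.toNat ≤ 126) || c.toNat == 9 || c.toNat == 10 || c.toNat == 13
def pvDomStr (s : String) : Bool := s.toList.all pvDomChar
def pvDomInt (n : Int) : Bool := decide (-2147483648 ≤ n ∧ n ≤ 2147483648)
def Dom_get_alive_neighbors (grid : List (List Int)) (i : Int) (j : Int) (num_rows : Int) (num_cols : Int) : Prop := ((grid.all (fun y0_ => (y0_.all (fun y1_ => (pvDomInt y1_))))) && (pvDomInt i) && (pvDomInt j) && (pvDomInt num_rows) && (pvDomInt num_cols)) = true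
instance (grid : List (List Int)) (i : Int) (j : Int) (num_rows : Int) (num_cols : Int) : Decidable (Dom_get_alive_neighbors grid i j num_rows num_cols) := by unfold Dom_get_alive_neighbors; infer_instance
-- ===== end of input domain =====

-- B sums the whole clamped 3x3 sub-block via list slicing and subtracts the 1x1 center
-- block (inclusion-exclusion), instead of looping over 8 offsets with a per-cell bounds
-- helper (objective: alternative).


-- ===== PORT A =====
def get_grid_value (grid : List (List Int)) (i : Int) (j : Int) (num_rows : Int) (num_cols : Int) : Int :=
  if i < 0 ∨ i ≥ num_rows ∨ j < 0 ∨ j ≥ num_cols then 0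
  else PySem.List.pyGetD (PySem.List.pyGetD grid i []) j 0   -- grid[i][j]; in-range under Pre_

def get_alive_neighbors (grid : List (List Int)) (i : Int) (j : Int) (num_rows : Int) (num_cols : Int) : Int :=
  ([-1, 0, 1] : List Int).foldl (fun res x =>
    ([-1, 0, 1] : List Int).foldl (fun res y =>
      if x = 0 ∧ y = 0 then res
      else res + get_grid_value grid (i + x) (j + y) num_rows num_cols) res) 0

-- ===== PORT B =====
-- B's inner helper block_sum (closes over grid, num_rows, num_cols in the Python)
def pvBlockSum (grid : List (List Int)) (num_rows : Int) (num_cols : Int) (r0 r1 c0 c1 : Int) : Int :=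
  (PySem.List.slice grid (some (max r0 0)) (some (max (min r1 num_rows) 0))).foldl
    (fun total row =>
      total + (PySem.List.slice row (some (max c0 0)) (some (max (min c1 num_cols) 0))).sum) 0

def get_alive_neighbors_alt (grid : List (List Int)) (i : Int) (j : Int) (num_rows : Int) (num_cols : Int) : Int :=
  pvBlockSum grid num_rows num_cols (i - 1) (i + 2) (j - 1) (j + 2)
    - pvBlockSum grid num_rows num_cols i (i + 1) j (j + 1)

-- ===== PRECONDITION & SPEC =====
-- Pre_ excludes exactly the inputs where the Python A raises IndexError: a neighbor cell
-- in bounds per num_rows/num_cols but missing from the actual grid (A crashes there; B's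
-- slices silently skip missing cells).
def Pre_get_alive_neighbors (grid : List (List Int)) (i : Int) (j : Int) (num_rows : Int) (num_cols : Int) : Prop :=
  ∀ x ∈ ([-1, 0, 1] : List Int), ∀ y ∈ ([-1, 0, 1] : List Int),
    ¬(x = 0 ∧ y = 0) → 0 ≤ i + x → i + x < num_rows → 0 ≤ j + y → j + y < num_cols →
      (i + x).toNat < grid.length ∧ (j + y).toNat < (grid.getD (i + x).toNat []).length
instance (grid : List (List Int)) (i : Int) (j : Int) (num_rows : Int) (num_cols : Int) : Decidable (Pre_get_alive_neighbors grid i j num_rows num_cols) := by unfold Pre_get_alive_neighbors; infer_instance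

def pvWitness_get_alive_neighbors : List (List Int) × Int × Int × Int × Int := ([[1, 0], [0, 1]], 0, 0, 2, 2)

def Spec_get_alive_neighbors (grid : List (List Int)) (i : Int) (j : Int) (num_rows : Int) (num_cols : Int) (out : Int) : Prop := out = get_alive_neighbors_alt grid i j num_rows num_cols
instance (grid : List (List Int)) (i : Int) (j : Int) (num_rows : Int) (num_cols : Int) (out : Int) : Decidable (Spec_get_alive_neighbors grid i j num_rows num_cols out) := by unfold Spec_get_alive_neighbors; infer_instance

-- ===== CLAIM (what is proved, stated in full; the proofs are below) =====
def Claim_equal_get_alive_neighbors : Prop := ∀ (grid : List (List Int)) (i : Int) (j : Int) (num_rows : Int) (num_cols : Int), Dom_get_alive_neighbors grid i j num_rows num_cols → Pre_get_alive_neighbors grid i j num_rows num_cols → Spec_get_alive_neighbors grid i j num_rows num_cols (get_alive_neighbors grid i j num_rows num_cols)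

-- ===== LEMMAS AND PROOFS =====

theorem pv_witness_ok : Dom_get_alive_neighbors pvWitness_get_alive_neighbors.1 pvWitness_get_alive_neighbors.2.1 pvWitness_get_alive_neighbors.2.2.1 pvWitness_get_alive_neighbors.2.2.2.1 pvWitness_get_alive_neighbors.2.2.2.2 ∧ Pre_get_alive_neighbors pvWitness_get_alive_neighbors.1 pvWitness_get_alive_neighbors.2.1 pvWitness_get_alive_neighbors.2.2.1 pvWitness_get_alive_neighbors.2.2.2.1 pvWitness_get_alive_neighbors.2.2.2.2 := by
  decide

-- a clamped slice equals the same index window read through pyGetD (up to the list's length)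
theorem pv_slice_eq_map {α : Type} (xs : List α) (a b : Int) (ha : 0 ≤ a) (hb : 0 ≤ b) (d : α) :
    PySem.List.slice xs (some a) (some b)
      = (PySem.List.pyRange a (min b xs.length)).map (fun x => PySem.List.pyGetD xs x d) := by
  rw [PySem.List.slice_toNat xs ha hb]
  apply List.ext_getElem
  · simp [PySem.List.length_pyRange_one]
    omega
  · intro k h1 h2
    simp only [List.getElem_take, List.getElem_drop, List.getElem_map,
      PySem.List.getElem_pyRange_one]
    rw [PySem.List.pyGetD_eq_getElem xs d (by omega)
      (by simp at h1 ⊢; omega)]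
    congr 1
    omega

-- sum of g over a clamped slice = sum of g ∘ pyGetD over the unclamped index range,
-- provided g vanishes on the default element
theorem pv_slice_map_sum {α : Type} (xs : List α) (d : α) (g : α → Int) (hg : g d = 0)
    (a b : Int) (ha : 0 ≤ a) (hb : 0 ≤ b) :
    ((PySem.List.slice xs (some a) (some b)).map g).sum
      = ((PySem.List.pyRange a b).map (fun x => g (PySem.List.pyGetD xs x d))).sum := by
  rw [pv_slice_eq_map xs a b ha hb d, List.map_map]
  by_cases h : a ≤ min b (xs.length : Int)
  · rw [PySem.List.pyRange_one_append a (min b (xs.length : Int)) b h (by omega),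
      List.map_append, List.sum_append]
    have : ((PySem.List.pyRange (min b (xs.length : Int)) b).map
        (fun x => g (PySem.List.pyGetD xs x d))).sum = 0 := by
      apply List.sum_eq_zero
      intro t ht
      obtain ⟨w, hw, rfl⟩ := List.mem_map.mp ht
      rw [PySem.List.mem_pyRange_one] at hw
      have : PySem.List.pyGetD xs w d = d := by
        simp only [PySem.List.pyGetD]
        rw [PySem.List.pyGet?_of_nonneg xs (show (0:Int) ≤ w by omega), List.getElem?_eq_none (by omega)]
        rfl
      rw [this, hg]
    rw [this]
    simp only [Function.comp_def]
    ring
  · rw [PySem.List.pyRange_one_eq_nil (by omega)]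
    symm
    apply List.sum_eq_zero
    intro t ht
    obtain ⟨w, hw, rfl⟩ := List.mem_map.mp ht
    rw [PySem.List.mem_pyRange_one] at hw
    have : PySem.List.pyGetD xs w d = d := by
      simp only [PySem.List.pyGetD]
      rw [PySem.List.pyGet?_of_nonneg xs (show (0:Int) ≤ w by omega), List.getElem?_eq_none (by omega)]
      rfl
    rw [this, hg]

-- summing F over the range clamped to [0, n) equals summing over the raw range
-- when F vanishes below 0 and from n on
theorem pv_sum_clamped (F : Int → Int) (a b n : Int)
    (h0 : ∀ z, z < 0 → F z = 0) (hn : ∀ z, n ≤ z → F z = 0) :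
    ((PySem.List.pyRange (max a 0) (max (min b n) 0)).map F).sum
      = ((PySem.List.pyRange a b).map F).sum := by
  by_cases hne : max a 0 ≤ max (min b n) 0
  · by_cases hb0 : min b n ≤ 0
    · have hlhs : max (min b n) 0 = 0 := by omega
      rw [hlhs, PySem.List.pyRange_one_eq_nil (by omega)]
      symm
      apply List.sum_eq_zero
      intro t ht
      obtain ⟨w, hw, rfl⟩ := List.mem_map.mp ht
      rw [PySem.List.mem_pyRange_one] at hw
      rcases (by omega : w < 0 ∨ n ≤ w) with h | h
      · exact h0 w h
      · exact hn w h
    · have h1 : max (min b n) 0 = min b n := by omega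
      rw [h1] at hne ⊢
      rw [PySem.List.pyRange_one_append a (max a 0) b (by omega) (by omega),
        PySem.List.pyRange_one_append (max a 0) (min b n) b hne (by omega),
        List.map_append, List.map_append, List.sum_append, List.sum_append]
      have hl : ((PySem.List.pyRange a (max a 0)).map F).sum = 0 := by
        apply List.sum_eq_zero
        intro t ht
        obtain ⟨w, hw, rfl⟩ := List.mem_map.mp ht
        rw [PySem.List.mem_pyRange_one] at hw
        exact h0 w (by omega)
      have hr : ((PySem.List.pyRange (min b n) b).map F).sum = 0 := by
        apply List.sum_eq_zero
        intro t ht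
        obtain ⟨w, hw, rfl⟩ := List.mem_map.mp ht
        rw [PySem.List.mem_pyRange_one] at hw
        rcases (by omega : n ≤ w) with h
        exact hn w h
      rw [hl, hr]
      ring
  · rw [PySem.List.pyRange_one_eq_nil (by omega)]
    symm
    apply List.sum_eq_zero
    intro t ht
    obtain ⟨w, hw, rfl⟩ := List.mem_map.mp ht
    rw [PySem.List.mem_pyRange_one] at hw
    rcases (by omega : w < 0 ∨ n ≤ w) with h | h
    · exact h0 w h
    · exact hn w h

-- the value a block cell contributes: the grid value under the declared bounds, else 0
def pvV (grid : List (List Int)) (num_rows num_cols x y : Int) : Int :=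
  if 0 ≤ x ∧ x < num_rows ∧ 0 ≤ y ∧ y < num_cols
  then PySem.List.pyGetD (PySem.List.pyGetD grid x []) y 0 else 0

theorem pvV_eq_get_grid_value (grid : List (List Int)) (num_rows num_cols x y : Int) :
    pvV grid num_rows num_cols x y = get_grid_value grid x y num_rows num_cols := by
  unfold pvV get_grid_value
  split_ifs with h1 h2 <;> first | rfl | (exfalso; omega)

theorem pvV_zero_x (grid : List (List Int)) (num_rows num_cols x y : Int)
    (h : x < 0 ∨ num_rows ≤ x) : pvV grid num_rows num_cols x y = 0 := by
  unfold pvV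
  rw [if_neg]
  omega

theorem pvV_zero_y (grid : List (List Int)) (num_rows num_cols x y : Int)
    (h : y < 0 ∨ num_cols ≤ y) : pvV grid num_rows num_cols x y = 0 := by
  unfold pvV
  rw [if_neg]
  omega

theorem pv_slice_nil_sum {α : Type} [Add α] [Zero α] (a b : Int) (ha : 0 ≤ a) (hb : 0 ≤ b) :
    (PySem.List.slice ([] : List α) (some a) (some b)).sum = 0 := by
  rw [PySem.List.slice_toNat _ ha hb]
  simp

-- one row of a block: the clamped row slice sums to the pvV sum over the raw column range
theorem pv_row_eq (grid : List (List Int)) (num_rows num_cols c0 c1 x : Int)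
    (hx0 : 0 ≤ x) (hxn : x < num_rows) :
    (PySem.List.slice (PySem.List.pyGetD grid x []) (some (max c0 0))
        (some (max (min c1 num_cols) 0))).sum
      = ((PySem.List.pyRange c0 c1).map (fun y => pvV grid num_rows num_cols x y)).sum := by
  rw [show (PySem.List.slice (PySem.List.pyGetD grid x []) (some (max c0 0))
        (some (max (min c1 num_cols) 0))).sum
      = ((PySem.List.slice (PySem.List.pyGetD grid x []) (some (max c0 0))
        (some (max (min c1 num_cols) 0))).map id).sum by simp]
  rw [pv_slice_map_sum (PySem.List.pyGetD grid x []) (0 : Int) id rfl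
      (max c0 0) (max (min c1 num_cols) 0) (by omega) (by omega)]
  rw [← pv_sum_clamped (fun y => pvV grid num_rows num_cols x y) c0 c1 num_cols
      (fun z hz => pvV_zero_y grid num_rows num_cols x z (Or.inl hz))
      (fun z hz => pvV_zero_y grid num_rows num_cols x z (Or.inr hz))]
  refine congrArg List.sum (List.map_congr_left ?_)
  intro y hy
  rw [PySem.List.mem_pyRange_one] at hy
  unfold pvV
  rw [if_pos ⟨hx0, hxn, by omega, by omega⟩]
  rfl

-- a block sum is the double sum of pvV over the raw (unclamped) index rectangle
theorem pv_block_eq (grid : List (List Int)) (num_rows num_cols r0 r1 c0 c1 : Int) :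
    pvBlockSum grid num_rows num_cols r0 r1 c0 c1
      = ((PySem.List.pyRange r0 r1).map (fun x =>
          ((PySem.List.pyRange c0 c1).map (fun y => pvV grid num_rows num_cols x y)).sum)).sum := by
  unfold pvBlockSum
  rw [PySem.List.foldl_add]
  rw [pv_slice_map_sum grid ([] : List Int)
    (fun row => (PySem.List.slice row (some (max c0 0)) (some (max (min c1 num_cols) 0))).sum)
    (pv_slice_nil_sum _ _ (by omega) (by omega))
    (max r0 0) (max (min r1 num_rows) 0) (by omega) (by omega)]
  rw [← pv_sum_clamped (fun x =>
        ((PySem.List.pyRange c0 c1).map (fun y => pvV grid num_rows num_cols x y)).sum) r0 r1 num_rows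
      (fun z hz => List.sum_eq_zero (fun t ht => by
        obtain ⟨w, _, rfl⟩ := List.mem_map.mp ht
        exact pvV_zero_x grid num_rows num_cols z w (Or.inl hz)))
      (fun z hz => List.sum_eq_zero (fun t ht => by
        obtain ⟨w, _, rfl⟩ := List.mem_map.mp ht
        exact pvV_zero_x grid num_rows num_cols z w (Or.inr hz)))]
  rw [zero_add]
  refine congrArg List.sum (List.map_congr_left ?_)
  intro x hx
  rw [PySem.List.mem_pyRange_one] at hx
  exact pv_row_eq grid num_rows num_cols c0 c1 x (by omega) (by omega)

theorem get_alive_neighbors_spec' (grid : List (List Int)) (i j num_rows num_cols : Int) :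
    get_alive_neighbors grid i j num_rows num_cols
      = get_alive_neighbors_alt grid i j num_rows num_cols := by
  unfold get_alive_neighbors_alt
  rw [pv_block_eq, pv_block_eq]
  have hr3 : PySem.List.pyRange (i - 1) (i + 2) = [i - 1, i, i + 1] := by
    rw [PySem.List.pyRange_one_cons (by omega), PySem.List.pyRange_one_cons (by omega),
      PySem.List.pyRange_one_cons (by omega), PySem.List.pyRange_one_eq_nil (by omega)]
    norm_num
  have hc3 : PySem.List.pyRange (j - 1) (j + 2) = [j - 1, j, j + 1] := by
    rw [PySem.List.pyRange_one_cons (by omega), PySem.List.pyRange_one_cons (by omega),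
      PySem.List.pyRange_one_cons (by omega), PySem.List.pyRange_one_eq_nil (by omega)]
    norm_num
  have hr1 : PySem.List.pyRange i (i + 1) = [i] := by
    rw [PySem.List.pyRange_one_cons (by omega), PySem.List.pyRange_one_eq_nil (by omega)]
  have hc1 : PySem.List.pyRange j (j + 1) = [j] := by
    rw [PySem.List.pyRange_one_cons (by omega), PySem.List.pyRange_one_eq_nil (by omega)]
  rw [hr3, hc3, hr1, hc1]
  unfold get_alive_neighbors
  simp only [List.foldl, List.map, List.sum_cons, List.sum_nil,
    pvV_eq_get_grid_value]
  norm_num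
  ring_nf

-- ===== VERDICT (by name: the statement is the Claim_ definition above) =====
theorem get_alive_neighbors_spec : Claim_equal_get_alive_neighbors := by
  intro grid i j num_rows num_cols _ _
  exact get_alive_neighbors_spec' grid i j num_rows num_cols
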